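-- pv_equiv track=rewrite | github.com/RaeSeong/algorithm | programmers/Brute_01.py | solution
-- ===== SOURCE A (Python) =====
-- def solution(answers):
--     one = [1,2,3,4,5]
--     two = [2,1,2,3,2,4,2,5]
--     three = [3,3,1,1,2,2,4,4,5,5]
--     score = [0,0,0]
--     for idx,val in enumerate(answers):
--         if one[idx%5] == val:
--             score[0] += 1
--         if two[idx%8] == val:
--             score[1] += 1
--         if three[idx%10] == val:
--             score[2] += 1
--     highest = max(score)
--     answer = []
--     for idx,i in enumerate(score):
--         if i == highest:
--             answer.append(idx+1)
--     return answer
-- ===== SOURCE B (Python) =====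
-- def solution(answers):
--     # State machine over rotating cyclic buffers: each pattern is kept as a
--     # deque-like list whose head is always the next expected answer; no index
--     # arithmetic or modulo is needed.
--     state = [(0, [1, 2, 3, 4, 5]),
--              (0, [2, 1, 2, 3, 2, 4, 2, 5]),
--              (0, [3, 3, 1, 1, 2, 2, 4, 4, 5, 5])]
--     for v in answers:
--         state = [(s + (p[0] == v), p[1:] + p[:1]) for s, p in state]
--     best = max(s for s, _ in state)
--     return [k + 1 for k, (s, _) in enumerate(state) if s == best]
-- ===== Notes on version B (the rewrite author's own statement) =====
-- stated objective: alternative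
-- what changed: A indexes fixed pattern lists with idx % len inside one fused counting loop; B keeps no index at all and instead carries a state machine of rotating cyclic buffers, comparing each answer with each buffer's head and rotating the buffers (p[1:] + p[:1]) after every element.
import Mathlib
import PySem

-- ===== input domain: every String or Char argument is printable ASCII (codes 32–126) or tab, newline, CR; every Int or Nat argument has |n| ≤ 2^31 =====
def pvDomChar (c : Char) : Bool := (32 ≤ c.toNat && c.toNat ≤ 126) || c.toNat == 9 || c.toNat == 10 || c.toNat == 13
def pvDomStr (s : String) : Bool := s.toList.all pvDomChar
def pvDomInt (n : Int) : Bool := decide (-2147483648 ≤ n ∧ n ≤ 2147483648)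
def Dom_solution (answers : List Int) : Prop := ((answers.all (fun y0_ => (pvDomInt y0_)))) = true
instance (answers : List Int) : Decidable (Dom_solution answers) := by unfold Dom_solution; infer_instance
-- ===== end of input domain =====

-- B replaces A's index/modulo bookkeeping by a state machine of rotating cyclic
-- buffers (each pattern's head is always the next expected answer); objective: alternative.

-- ===== PORT A =====
def solution (answers : List Int) : List Int :=
  let one : List Int := [1, 2, 3, 4, 5]
  let two : List Int := [2, 1, 2, 3, 2, 4, 2, 5]
  let three : List Int := [3, 3, 1, 1, 2, 2, 4, 4, 5, 5]
  -- the mutable 3-element list `score` is carried as a triple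
  let score : Int × Int × Int := (PySem.List.enumerate answers 0).foldl
    (fun s iv =>
      let s0 := if PySem.List.pyGet? one (PySem.Int.mod iv.1 5) = some iv.2 then s.1 + 1 else s.1
      let s1 := if PySem.List.pyGet? two (PySem.Int.mod iv.1 8) = some iv.2 then s.2.1 + 1 else s.2.1
      let s2 := if PySem.List.pyGet? three (PySem.Int.mod iv.1 10) = some iv.2 then s.2.2 + 1 else s.2.2
      (s0, s1, s2)) (0, 0, 0)
  let scoreL : List Int := [score.1, score.2.1, score.2.2]
  let highest : Int := (PySem.List.max? scoreL (fun x => x)).getD 0  -- list is nonempty, max never raises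
  (PySem.List.enumerate scoreL 0).foldl
    (fun acc iv => if iv.2 = highest then acc ++ [iv.1 + 1] else acc) []

-- ===== PORT B =====
def solution_alt (answers : List Int) : List Int :=
  let init : List (Int × List Int) :=
    [(0, [1, 2, 3, 4, 5]), (0, [2, 1, 2, 3, 2, 4, 2, 5]), (0, [3, 3, 1, 1, 2, 2, 4, 4, 5, 5])]
  -- s + (p[0] == v): Python adds the bool as 0/1; p[1:] + p[:1] rotates the buffer
  let state : List (Int × List Int) := answers.foldl (fun st v =>
    st.map (fun sp =>
      (sp.1 + (if PySem.List.pyGet? sp.2 0 = some v then 1 else 0),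
       PySem.List.slice sp.2 (some 1) none ++ PySem.List.slice sp.2 none (some 1)))) init
  let best : Int := (PySem.List.max? (state.map (fun sp => sp.1)) (fun x => x)).getD 0  -- state nonempty, max never raises
  (PySem.List.enumerate state 0).filterMap
    (fun ksp => if ksp.2.1 = best then some (ksp.1 + 1) else none)

-- ===== PRECONDITION & SPEC =====
def Spec_solution (answers : List Int) (out : List Int) : Prop := out = solution_alt answers
instance (answers : List Int) (out : List Int) : Decidable (Spec_solution answers out) := by unfold Spec_solution; infer_instance

-- ===== CLAIM (what is proved, stated in full; the proofs are below) =====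
def Claim_equal_solution : Prop := ∀ (answers : List Int), Dom_solution answers → Spec_solution answers (solution answers)

-- ===== LEMMAS AND PROOFS =====

-- rotating a nonempty buffer by one: p[1:] + p[:1] = rotate 1
theorem pv_rot_step (q : List Int) (h : q ≠ []) :
    PySem.List.slice q (some 1) none ++ PySem.List.slice q none (some 1) = q.rotate 1 := by
  rw [PySem.List.slice_from_one, PySem.List.slice_to q (by norm_num),
      List.rotate_eq_drop_append_take (by cases q <;> simp_all)]
  simp [List.drop_one]

-- head of a k-rotated pattern is the pattern's (k mod len) element, as A reads it
theorem pv_head_rot (P : List Int) (k : Nat) (hP : P ≠ []) :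
    PySem.List.pyGet? (P.rotate k) 0 = PySem.List.pyGet? P (PySem.Int.mod (k : Int) (P.length : Int)) := by
  have hlen : 0 < P.length := List.length_pos_iff.mpr hP
  rw [PySem.Int.mod_natCast]
  have h0 : ((0 : Int)) = ((0 : Nat) : Int) := rfl
  rw [h0, PySem.List.pyGet?_natCast, PySem.List.pyGet?_natCast]
  rw [List.getElem?_eq_getElem (by simpa using hlen), List.getElem?_eq_getElem (Nat.mod_lt _ hlen)]
  simp [List.getElem_rotate]

-- loop invariant: B's rotating-state fold carries exactly A's three running scores
theorem pv_loop (ans : List Int) : ∀ (k : Nat) (s1 s2 s3 : Int),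
    ans.foldl (fun st v =>
      st.map (fun sp =>
        (sp.1 + (if PySem.List.pyGet? sp.2 0 = some v then 1 else 0),
         PySem.List.slice sp.2 (some 1) none ++ PySem.List.slice sp.2 none (some 1))))
      [(s1, ([1,2,3,4,5] : List Int).rotate k), (s2, ([2,1,2,3,2,4,2,5] : List Int).rotate k),
       (s3, ([3,3,1,1,2,2,4,4,5,5] : List Int).rotate k)]
    = (fun t : Int × Int × Int =>
        [(t.1, ([1,2,3,4,5] : List Int).rotate (k + ans.length)),
         (t.2.1, ([2,1,2,3,2,4,2,5] : List Int).rotate (k + ans.length)),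
         (t.2.2, ([3,3,1,1,2,2,4,4,5,5] : List Int).rotate (k + ans.length))])
      ((PySem.List.enumerate ans (k : Int)).foldl
        (fun s iv =>
          let s0 := if PySem.List.pyGet? ([1,2,3,4,5] : List Int) (PySem.Int.mod iv.1 5) = some iv.2 then s.1 + 1 else s.1
          let s1 := if PySem.List.pyGet? ([2,1,2,3,2,4,2,5] : List Int) (PySem.Int.mod iv.1 8) = some iv.2 then s.2.1 + 1 else s.2.1
          let s2 := if PySem.List.pyGet? ([3,3,1,1,2,2,4,4,5,5] : List Int) (PySem.Int.mod iv.1 10) = some iv.2 then s.2.2 + 1 else s.2.2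
          (s0, s1, s2)) (s1, s2, s3)) := by
  induction ans with
  | nil => intro k s1 s2 s3; simp [PySem.List.enumerate_nil]
  | cons v t ih =>
    intro k s1 s2 s3
    rw [PySem.List.enumerate_cons]
    simp only [List.foldl_cons, List.map_cons, List.map_nil]
    rw [pv_rot_step _ (by simp), pv_rot_step _ (by simp), pv_rot_step _ (by simp),
        List.rotate_rotate, List.rotate_rotate, List.rotate_rotate,
        pv_head_rot _ k (by simp), pv_head_rot _ k (by simp), pv_head_rot _ k (by simp)]
    have hc : ((k : Int) + 1) = (((k + 1 : Nat)) : Int) := by push_cast; ring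
    rw [hc, ih (k + 1)]
    have harr : k + 1 + t.length = k + (t.length + 1) := by omega
    rw [harr]
    norm_num
    split_ifs <;> simp_all

theorem solution_eq (answers : List Int) : solution answers = solution_alt answers := by
  simp only [solution, solution_alt]
  have h := pv_loop answers 0 0 0 0
  simp only [List.rotate_zero, Nat.cast_zero] at h
  rw [h]
  generalize ((PySem.List.enumerate answers 0).foldl _ ((0:Int), (0:Int), (0:Int))) = t
  obtain ⟨t1, t2, t3⟩ := t
  simp only [List.map_cons, List.map_nil, PySem.List.enumerate_cons, PySem.List.enumerate_nil,
    List.foldl_cons, List.foldl_nil, List.filterMap_cons, List.filterMap_nil]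
  split_ifs <;> simp

-- ===== VERDICT (by name: the statement is the Claim_ definition above) =====
theorem solution_spec : Claim_equal_solution := by
  intro answers _
  unfold Spec_solution
  exact solution_eq answers
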